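-- pv_equiv track=rewrite | github.com/sofasolver/cybertalent_ctf_2023 | 2_2_1_klassisk_krypto.py | pat_search
-- ===== SOURCE A (Python) =====
-- def pat_match(pat: str, s: str) -> bool:
--     if len(pat) != len(s):
--         return False
--
--     mapping = dict()
--
--     for a, b in zip(pat, s):
--         if a == "-":
--             continue
--
--         if a not in mapping:
--             mapping[a] = b
--         elif mapping[a] != b:
--             return False
--     return True
--
-- def pat_search(ciph: str, pat: str) -> list[int]:
--     pat = pat.replace(" ", "")
--
--     ret = []
--     for i in range(0, len(ciph), 2):
--         sub = ciph[i:i+len(pat)]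
--         if len(sub) < len(pat):
--             break
--
--         if pat_match(pat, sub):
--             ret.append(i)
--     return ret
-- ===== SOURCE B (Python) =====
-- def pat_search(ciph: str, pat: str) -> list[int]:
--     p = pat.replace(" ", "")
--     L, n = len(p), len(ciph)
--     # equality constraints: each later occurrence of a symbol must equal its first occurrence
--     pairs = [(p.index(c), j) for j, c in enumerate(p) if c != "-" and p.index(c) != j]
--     cand = [i for i in range(0, n, 2) if i + L <= n]
--     for a, b in pairs:
--         cand = [i for i in cand if ciph[i + a] == ciph[i + b]]
--     return cand
-- ===== Notes on version B (the rewrite author's own statement) =====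
-- stated objective: alternative
-- what changed: Replaces the window-major scan with a per-window dict matcher by a constraint-major algorithm: it compiles the pattern once into a list of position-pairs (first occurrence, later occurrence) that must hold equal characters, builds the list of all candidate even offsets, and then narrows that candidate list by one filtering pass per constraint, indexing directly into the ciphertext with no slicing and no per-window matcher.
import Mathlib
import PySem

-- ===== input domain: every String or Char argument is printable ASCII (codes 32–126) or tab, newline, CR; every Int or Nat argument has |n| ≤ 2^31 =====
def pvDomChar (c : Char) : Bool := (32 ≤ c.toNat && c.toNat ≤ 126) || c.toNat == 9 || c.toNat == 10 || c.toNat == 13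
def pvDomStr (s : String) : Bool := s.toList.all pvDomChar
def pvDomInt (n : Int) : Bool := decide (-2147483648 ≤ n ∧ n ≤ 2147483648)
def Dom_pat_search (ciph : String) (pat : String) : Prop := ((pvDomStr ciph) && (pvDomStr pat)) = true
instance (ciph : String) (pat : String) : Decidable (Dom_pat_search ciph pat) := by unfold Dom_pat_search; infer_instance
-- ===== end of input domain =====

-- B replaces A's window-major scan (per-window dict matcher) by a constraint-major
-- algorithm: equality-constraint position pairs compiled once from the pattern, then one
-- candidate-narrowing filter pass per constraint; return values proved equal on Dom.


-- ===== PORT A =====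
-- the 'for a, b in zip(pat, s)' loop of pat_match, with its early 'return False'
def patMatchLoopA (m : PySem.Dict Char Char) : List (Char × Char) → Bool
  | [] => true
  | (a, b) :: rest =>
    if a = '-' then patMatchLoopA m rest
    else
      match m.get? a with
      | none => patMatchLoopA (m.insert a b) rest
      | some c => if c ≠ b then false else patMatchLoopA m rest

def patMatchA (pat s : List Char) : Bool :=
  if pat.length ≠ s.length then false
  else patMatchLoopA PySem.Dict.empty (pat.zip s)

-- the 'for i in range(0, len(ciph), 2)' loop, with its 'break'
def searchLoopA (ciph p : List Char) (ret : List Int) : List Int → List Int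
  | [] => ret
  | i :: rest =>
    let sub := PySem.List.slice ciph (some i) (some (i + (p.length : Int)))
    if sub.length < p.length then ret
    else if patMatchA p sub then searchLoopA ciph p (ret ++ [i]) rest
    else searchLoopA ciph p ret rest

def pat_search (ciph : String) (pat : String) : List Int :=
  let p := PySem.Chars.replace pat.toList [' '] []
  searchLoopA ciph.toList p [] (PySem.List.pyRange 0 (ciph.toList.length : Int) 2)

-- ===== PORT B =====
-- 'pairs = [(p.index(c), j) for j, c in enumerate(p) if c != "-" and p.index(c) != j]';
-- p.index(c) never raises here since c ∈ p, so the getD default is never used.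
def pairsOf (p : List Char) : List (Int × Int) :=
  (PySem.List.enumerate p 0).filterMap fun jc =>
    if jc.2 ≠ '-' ∧ (((PySem.List.index? p jc.2).getD 0 : Nat) : Int) ≠ jc.1
    then some ((((PySem.List.index? p jc.2).getD 0 : Nat) : Int), jc.1)
    else none

-- candidate even offsets, then one filtering pass per constraint pair; each ciph[i+a]
-- index is in range when reached (i + len(p) ≤ len(ciph)), so pyGetD defaults are unused.
def pat_search_alt (ciph : String) (pat : String) : List Int :=
  let p := PySem.Chars.replace pat.toList [' '] []
  let pairs := pairsOf p
  let cand := (PySem.List.pyRange 0 (ciph.toList.length : Int) 2).filter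
    (fun i => decide (i + (p.length : Int) ≤ (ciph.toList.length : Int)))
  pairs.foldl (fun cand ab =>
    cand.filter (fun i =>
      PySem.List.pyGetD ciph.toList (i + ab.1) ' ' == PySem.List.pyGetD ciph.toList (i + ab.2) ' ')) cand

-- ===== PRECONDITION & SPEC =====
def Spec_pat_search (ciph : String) (pat : String) (out : List Int) : Prop := out = pat_search_alt ciph pat
instance (ciph : String) (pat : String) (out : List Int) : Decidable (Spec_pat_search ciph pat out) := by unfold Spec_pat_search; infer_instance

-- ===== CLAIM (what is proved, stated in full; the proofs are below) =====
def Claim_equal_pat_search : Prop := ∀ (ciph : String) (pat : String), Dom_pat_search ciph pat → Spec_pat_search ciph pat (pat_search ciph pat)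

-- ===== LEMMAS AND PROOFS =====

-- value at the first occurrence of symbol a among the (pattern, window) pairs
def firstVal? (a : Char) (pr : List (Char × Char)) : Option Char :=
  (pr.find? (fun x => x.1 == a)).map (·.2)

theorem firstVal?_cons_self (a b : Char) (tl : List (Char × Char)) :
    firstVal? a ((a, b) :: tl) = some b := by
  simp [firstVal?]

theorem firstVal?_cons_of_ne (a b c : Char) (tl : List (Char × Char)) (h : a ≠ c) :
    firstVal? c ((a, b) :: tl) = firstVal? c tl := by
  have hf : (a == c) = false := by simp [h]
  simp [firstVal?, List.find?, hf]

theorem loopA_iff (pr : List (Char × Char)) (m : PySem.Dict Char Char) :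
    patMatchLoopA m pr = true ↔
      ∀ x ∈ pr, x.1 ≠ '-' → some x.2 = ((m.get? x.1).or (firstVal? x.1 pr)) := by
  induction pr generalizing m with
  | nil => simp [patMatchLoopA]
  | cons hd tl ih =>
    obtain ⟨a, b⟩ := hd
    by_cases ha : a = '-'
    · subst ha
      rw [patMatchLoopA, if_pos rfl, ih, List.forall_mem_cons]
      constructor
      · intro h
        refine ⟨fun hne => absurd rfl hne, fun x hx hne => ?_⟩
        rw [firstVal?_cons_of_ne _ _ _ _ (Ne.symm hne)]
        exact h x hx hne
      · rintro ⟨_, h⟩ x hx hne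
        have hh := h x hx hne
        rwa [firstVal?_cons_of_ne _ _ _ _ (Ne.symm hne)] at hh
    · cases hga : m.get? a with
      | none =>
        simp only [patMatchLoopA, if_neg ha, hga, ih, List.forall_mem_cons]
        constructor
        · intro h
          refine ⟨fun _ => ?_, fun x hx hne => ?_⟩
          · rw [Option.none_or, firstVal?_cons_self]
          · have hh := h x hx hne
            by_cases hxa : x.1 = a
            · rw [hxa, firstVal?_cons_self, hga, Option.none_or]
              rw [hxa, PySem.Dict.get?_insert_self] at hh
              simpa using hh
            · rw [firstVal?_cons_of_ne _ _ _ _ (fun e => hxa e.symm)]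
              rwa [PySem.Dict.get?_insert_of_ne _ _ hxa] at hh
        · rintro ⟨_, h⟩ x hx hne
          have hh := h x hx hne
          by_cases hxa : x.1 = a
          · rw [hxa, firstVal?_cons_self, hga, Option.none_or] at hh
            rw [hxa, PySem.Dict.get?_insert_self]
            simpa using hh
          · rw [firstVal?_cons_of_ne _ _ _ _ (fun e => hxa e.symm)] at hh
            rwa [PySem.Dict.get?_insert_of_ne _ _ hxa]
      | some c =>
        by_cases hcb : c = b
        · have hif : (if c ≠ b then false else patMatchLoopA m tl) = patMatchLoopA m tl := by
            simp [hcb]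
          simp only [patMatchLoopA, if_neg ha, hga, hif, ih, List.forall_mem_cons]
          constructor
          · intro h
            refine ⟨fun _ => ?_, fun x hx hne => ?_⟩
            · rw [Option.some_or, hcb]
            · have hh := h x hx hne
              by_cases hxa : x.1 = a
              · rw [hxa, hga, Option.some_or] at hh ⊢
                exact hh
              · rwa [firstVal?_cons_of_ne _ _ _ _ (fun e => hxa e.symm)]
          · rintro ⟨_, h⟩ x hx hne
            have hh := h x hx hne
            by_cases hxa : x.1 = a
            · rw [hxa, hga, Option.some_or] at hh ⊢
              exact hh
            · rwa [firstVal?_cons_of_ne _ _ _ _ (fun e => hxa e.symm)] at hh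
        · have hif : (if c ≠ b then false else patMatchLoopA m tl) = false := if_pos hcb
          simp only [patMatchLoopA, if_neg ha, hga, hif, List.forall_mem_cons]
          constructor
          · intro h
            exact (Bool.false_ne_true h).elim
          · rintro ⟨hh, -⟩
            have h2 := hh ha
            rw [Option.some_or] at h2
            exact absurd (Option.some.inj h2).symm hcb

theorem firstVal?_zip (p : List Char) (s : List Char) (a : Char) (h : p.length = s.length) :
    firstVal? a (p.zip s) = (PySem.List.index? p a).bind (fun k => s[k]?) := by
  induction p generalizing s with
  | nil => simp [firstVal?, PySem.List.index?_eq_idxOf?]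
  | cons c p' ih =>
    cases s with
    | nil => simp at h
    | cons d s' =>
      rw [List.zip_cons_cons]
      by_cases hca : c = a
      · subst hca
        rw [firstVal?_cons_self, PySem.List.index?_cons_self]
        rfl
      · rw [firstVal?_cons_of_ne _ _ _ _ hca, PySem.List.index?_cons_of_ne _ hca,
            ih s' (by simpa using h)]
        cases PySem.List.index? p' a with
        | none => rfl
        | some k => simp

theorem idx_exists (p : List Char) (k : Nat) (hk : k < p.length) :
    ∃ k0, PySem.List.index? p p[k] = some k0 ∧ k0 < p.length := by
  have hmem : p[k] ∈ p := List.getElem_mem hk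
  have hsome : (PySem.List.index? p p[k]).isSome = true :=
    (PySem.List.index?_isSome_iff p p[k]).mpr hmem
  obtain ⟨k0, hk0⟩ := Option.isSome_iff_exists.mp hsome
  obtain ⟨hlt, -, -⟩ := PySem.List.getElem_of_index?_eq_some hk0
  exact ⟨k0, hk0, hlt⟩

theorem firstVal_at (p sub : List Char) (h : p.length = sub.length) (k k0 : Nat)
    (hk : k < p.length) (hidx : PySem.List.index? p p[k] = some k0) (hk0 : k0 < sub.length) :
    firstVal? p[k] (p.zip sub) = some sub[k0] := by
  rw [firstVal?_zip p sub _ h, hidx]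
  simp [List.getElem?_eq_getElem hk0]

-- A's matcher characterised position-wise: every non-dash position must repeat the
-- character at its symbol's first occurrence
theorem matchA_iff (p sub : List Char) (h : sub.length = p.length) :
    patMatchA p sub = true ↔
      ∀ (k k0 : Nat) (hk : k < p.length) (hk0 : k0 < p.length), p[k] ≠ '-' →
        PySem.List.index? p p[k] = some k0 → sub[k]'(by omega) = sub[k0]'(by omega) := by
  rw [patMatchA, if_neg (by omega), loopA_iff]
  constructor
  · intro hA k k0 hk hk0 hd hidx
    have hkz : k < (p.zip sub).length := by
      simp [List.length_zip]
      omega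
    have hx : (p[k], sub[k]'(by omega)) ∈ p.zip sub := by
      have := List.getElem_mem hkz
      rwa [List.getElem_zip] at this
    have hh := hA _ hx hd
    rw [PySem.Dict.get?_empty, Option.none_or,
      firstVal_at p sub (by omega) k k0 hk hidx (by omega)] at hh
    exact Option.some.inj hh
  · intro hB x hx hd
    obtain ⟨k, hkz, hxk⟩ := List.mem_iff_getElem.mp hx
    rw [List.getElem_zip] at hxk
    have hk : k < p.length := by
      simp [List.length_zip] at hkz
      omega
    obtain ⟨k0, hidx, hk0⟩ := idx_exists p k hk
    have hd' : p[k] ≠ '-' := by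
      intro e
      exact hd (by rw [← hxk]; exact e)
    rw [← hxk, PySem.Dict.get?_empty, Option.none_or,
      firstVal_at p sub (by omega) k k0 hk hidx (by omega)]
    exact congrArg some (hB k k0 hk hk0 hd' hidx)

theorem mem_pairsOf (p : List Char) (ab : Int × Int) :
    ab ∈ pairsOf p ↔ ∃ (k k0 : Nat) (hk : k < p.length),
      p[k] ≠ '-' ∧ PySem.List.index? p p[k] = some k0 ∧ k0 ≠ k ∧ ab = ((k0 : Int), (k : Int)) := by
  unfold pairsOf
  rw [List.mem_filterMap]
  constructor
  · rintro ⟨jc, hmem, hres⟩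
    obtain ⟨k, hk, rfl⟩ := (PySem.List.mem_enumerate_iff p 0 jc).mp hmem
    split_ifs at hres with hcond
    · obtain ⟨hd, hne⟩ := hcond
      simp only at hd hne hres
      obtain ⟨k0, hidx, -⟩ := idx_exists p k hk
      rw [hidx] at hne hres
      refine ⟨k, k0, hk, hd, hidx, ?_, ?_⟩
      · intro e
        apply hne
        simp [e]
      · simpa using (Option.some.inj hres).symm
  · rintro ⟨k, k0, hk, hd, hidx, hne, rfl⟩
    refine ⟨((0 : Int) + (k : Int), p[k]), (PySem.List.mem_enumerate_iff p 0 _).mpr ⟨k, hk, rfl⟩, ?_⟩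
    rw [if_pos]
    · rw [hidx]
      simp
    · refine ⟨hd, ?_⟩
      rw [hidx]
      simp
      omega

theorem pyGetD_add_nat (cl : List Char) (j k : Nat) (h : j + k < cl.length) :
    PySem.List.pyGetD cl ((j : Int) + (k : Int)) ' ' = cl[j + k] := by
  rw [show (j : Int) + (k : Int) = ((j + k : Nat) : Int) by push_cast; ring,
    PySem.List.pyGetD_natCast]
  exact List.getD_eq_getElem cl ' ' h

-- the per-window equivalence: A's matcher on the window = B's pair checks on ciph
theorem check_eq (cl p : List Char) (j : Nat) (hj : j + p.length ≤ cl.length) :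
    patMatchA p ((cl.drop j).take p.length)
      = (pairsOf p).all (fun ab =>
          PySem.List.pyGetD cl ((j : Int) + ab.1) ' ' == PySem.List.pyGetD cl ((j : Int) + ab.2) ' ') := by
  have hlen : ((cl.drop j).take p.length).length = p.length := by
    simp
    omega
  have hsubget : ∀ (k : Nat) (hk : k < p.length),
      ((cl.drop j).take p.length)[k]'(by omega) = cl[j + k]'(by omega) := by
    intro k hk
    rw [List.getElem_take, List.getElem_drop]
  rw [Bool.eq_iff_iff, matchA_iff p _ hlen, List.all_eq_true]
  constructor
  · intro hA ab hab
    obtain ⟨k, k0, hk, hd, hidx, hne, rfl⟩ := (mem_pairsOf p ab).mp hab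
    obtain ⟨hk0, -, -⟩ := PySem.List.getElem_of_index?_eq_some hidx
    have := hA k k0 hk hk0 hd hidx
    rw [hsubget k hk, hsubget k0 hk0] at this
    simp only [pyGetD_add_nat cl j k0 (by omega), pyGetD_add_nat cl j k (by omega)]
    simp [this]
  · intro hB k k0 hk hk0 hd hidx
    by_cases hke : k0 = k
    · subst hke
      rfl
    · have hab := hB ((k0 : Int), (k : Int)) ((mem_pairsOf p _).mpr ⟨k, k0, hk, hd, hidx, hke, rfl⟩)
      simp only [pyGetD_add_nat cl j k0 (by omega), pyGetD_add_nat cl j k (by omega)] at hab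
      rw [hsubget k hk, hsubget k0 hk0]
      exact ((beq_iff_eq).mp hab).symm

theorem foldl_filter {α β : Type} (f : β → α → Bool) (prs : List β) (c0 : List α) :
    prs.foldl (fun c ab => c.filter (fun i => f ab i)) c0
      = c0.filter (fun i => prs.all (fun ab => f ab i)) := by
  induction prs generalizing c0 with
  | nil => simp
  | cons hd tl ih =>
    rw [List.foldl_cons, ih, List.filter_filter]
    apply List.filter_congr
    intro x _
    simp [Bool.and_comm]

theorem takeWhile_congr_mem {α : Type} (p q : α → Bool) (l : List α)
    (h : ∀ x ∈ l, p x = q x) : l.takeWhile p = l.takeWhile q := by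
  induction l with
  | nil => rfl
  | cons a l ih =>
    have ha := h a (by simp)
    rw [List.takeWhile_cons, List.takeWhile_cons, ha]
    by_cases hq : q a = true
    · simp [hq, ih (fun x hx => h x (by simp [hx]))]
    · simp [hq]

theorem takeWhile_eq_filter_of_down {α : Type} (p : α → Bool) (l : List α)
    (h : l.Pairwise (fun a b => p a = false → p b = false)) :
    l.takeWhile p = l.filter p := by
  induction l with
  | nil => rfl
  | cons a l ih =>
    rcases List.pairwise_cons.mp h with ⟨hhd, htl⟩
    by_cases hp : p a = true
    · simp [hp, ih htl]
    · have hpf : p a = false := by simpa using hp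
      have hnil : l.filter p = [] :=
        List.filter_eq_nil_iff.mpr (fun x hx => by simp [hhd x hx hpf])
      simp [hpf, hnil]

-- the break-loop computed as takeWhile-then-filter
theorem searchLoopA_eq (ciph p : List Char) (idxs : List Int) (ret : List Int) :
    searchLoopA ciph p ret idxs =
      ret ++ (idxs.takeWhile (fun i =>
          !decide ((PySem.List.slice ciph (some i) (some (i + (p.length : Int)))).length < p.length))).filter
        (fun i => patMatchA p (PySem.List.slice ciph (some i) (some (i + (p.length : Int))))) := by
  induction idxs generalizing ret with
  | nil => simp [searchLoopA]
  | cons i rest ih =>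
    by_cases hbr : (PySem.List.slice ciph (some i) (some (i + (p.length : Int)))).length < p.length
    · simp [searchLoopA, hbr]
    · by_cases hm : patMatchA p (PySem.List.slice ciph (some i) (some (i + (p.length : Int)))) = true
      · simp [searchLoopA, hbr, hm, ih]
      · simp [searchLoopA, hbr, hm, ih]

theorem pairwise_pyRange_two (n : Int) :
    (PySem.List.pyRange 0 n 2).Pairwise (· < ·) := by
  rw [PySem.List.pyRange_of_pos 0 n (show (0:Int) < 2 by norm_num)]
  exact List.pairwise_map.mpr ((List.pairwise_lt_range).imp (by intro a b hab; omega))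

theorem ok_eq (cl : List Char) (L : Nat) (i : Int) (h0 : 0 ≤ i) (hn : i < (cl.length : Int)) :
    (!decide ((PySem.List.slice cl (some i) (some (i + (L : Int)))).length < L))
      = decide (i + (L : Int) ≤ (cl.length : Int)) := by
  obtain ⟨m, rfl⟩ : ∃ m : Nat, i = (m : Int) := ⟨i.toNat, (Int.toNat_of_nonneg h0).symm⟩
  rw [show (m : Int) + (L : Int) = ((m + L : Nat) : Int) by push_cast; ring,
    PySem.List.length_slice, PySem.List.clampIdx_natCast, PySem.List.clampIdx_natCast]
  have hmn : m < cl.length := by exact_mod_cast hn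
  by_cases hc : m + L ≤ cl.length
  · have h1 : ¬ (min (m + L) cl.length - min m cl.length < L) := by omega
    simp only [h1, decide_false, Bool.not_false]
    rw [eq_comm, decide_eq_true_eq]
    push_cast
    omega
  · have h1 : min (m + L) cl.length - min m cl.length < L := by omega
    simp only [h1, decide_true, Bool.not_true]
    rw [eq_comm, decide_eq_false_iff_not]
    push_cast
    omega

-- ===== VERDICT (by name: the statement is the Claim_ definition above) =====
theorem pat_search_spec : Claim_equal_pat_search := by
  intro ciph pat _
  unfold Spec_pat_search
  simp only [pat_search, pat_search_alt]
  set cl := ciph.toList with hcl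
  set p := PySem.Chars.replace pat.toList [' '] [] with hp
  have hcong : ∀ i ∈ PySem.List.pyRange 0 (cl.length : Int) 2,
      (!decide ((PySem.List.slice cl (some i) (some (i + (p.length : Int)))).length < p.length))
        = decide (i + (p.length : Int) ≤ (cl.length : Int)) := by
    intro i hi
    obtain ⟨h0, h1, -⟩ := (PySem.List.mem_pyRange_iff_of_pos (by norm_num) i).mp hi
    exact ok_eq cl p.length i h0 h1
  have hdown : (PySem.List.pyRange 0 (cl.length : Int) 2).Pairwise
      (fun a b => (decide (a + (p.length : Int) ≤ (cl.length : Int)) = false) →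
        (decide (b + (p.length : Int) ≤ (cl.length : Int)) = false)) := by
    refine (pairwise_pyRange_two _).imp ?_
    intro a b hab
    simp only [decide_eq_false_iff_not]
    omega
  rw [searchLoopA_eq, List.nil_append,
    takeWhile_congr_mem _ _ _ hcong,
    takeWhile_eq_filter_of_down _ _ hdown,
    foldl_filter]
  apply List.filter_congr
  intro i hi
  obtain ⟨hmem, hok⟩ := List.mem_filter.mp hi
  obtain ⟨h0, h1, -⟩ := (PySem.List.mem_pyRange_iff_of_pos (by norm_num) i).mp hmem
  have hle : i + (p.length : Int) ≤ (cl.length : Int) := by simpa using hok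
  obtain ⟨m, rfl⟩ : ∃ m : Nat, i = (m : Int) := ⟨i.toNat, (Int.toNat_of_nonneg h0).symm⟩
  rw [PySem.List.slice_natCast_add]
  exact check_eq cl p m (by exact_mod_cast hle)
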